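-- pv_equiv track=rewrite | github.com/riasaxena/165-project1 | shell_sort3.py | A003586
-- ===== SOURCE A (Python) =====
-- def A003586(n):
--     seq = [1]
--     i, j = 0, 0
--     k = 0
--     while True:
--         val = min(seq[i] * 2, seq[j] * 3)
--         if val > n:
--             break
--         seq.append(val)
--         k += 1
--
--         if val == seq[i] * 2:
--             i += 1
--
--         if val == seq[j] * 3:
--             j += 1
--     return seq[::-1]
-- ===== SOURCE B (Python) =====
-- def A003586(n):
--     vals = {1}
--     p2 = 1
--     while p2 <= n:
--         p = p2
--         while p <= n:
--             vals.add(p)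
--             p *= 3
--         p2 *= 2
--     return sorted(vals, reverse=True)
-- ===== Notes on version B (the rewrite author's own statement) =====
-- stated objective: alternative
-- what changed: Replaces A's incremental two-pointer (Hamming-style) merge that grows the sequence in ascending order with a direct nested enumeration of all products of powers of two and powers of three up to n into a set seeded with one, followed by a single descending sort.
import Mathlib
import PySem

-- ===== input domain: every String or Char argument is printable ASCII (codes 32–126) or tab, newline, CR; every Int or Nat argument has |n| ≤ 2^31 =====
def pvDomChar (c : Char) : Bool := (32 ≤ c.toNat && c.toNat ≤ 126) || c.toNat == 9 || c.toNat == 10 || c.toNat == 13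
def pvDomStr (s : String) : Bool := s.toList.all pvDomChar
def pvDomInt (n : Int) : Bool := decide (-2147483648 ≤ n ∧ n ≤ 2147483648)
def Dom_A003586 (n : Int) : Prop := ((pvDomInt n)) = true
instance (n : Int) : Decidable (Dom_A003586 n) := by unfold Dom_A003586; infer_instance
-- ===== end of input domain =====

-- B replaces A's two-pointer merge by a direct nested enumeration of the numbers 2^a*3^b ≤ n
-- (a set seeded with 1) followed by one descending sort: a different algorithm of similar cost.

-- ===== PORT A =====
-- A's 'while True' loop; the fuel only makes the recursion total (each appended value is a
-- strictly larger integer ≤ n, so n.toNat + 1 steps always suffice — proved in loopA_spec).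
def A003586.loop (n : Int) (seq : List Int) (i j : Nat) (k : Int) : Nat → List Int
  | 0 => []
  | fuel + 1 =>
    let val := min (seq.getD i 0 * 2) (seq.getD j 0 * 3)
    if val > n then (PySem.List.slice? seq none none (-1)).getD []
    else
      let seq' := seq ++ [val]
      A003586.loop n seq'
        (if val = seq'.getD i 0 * 2 then i + 1 else i)
        (if val = seq'.getD j 0 * 3 then j + 1 else j)
        (k + 1) fuel

def A003586 (n : Int) : List Int := A003586.loop n [1] 0 0 0 (n.toNat + 1)

-- ===== PORT B =====
-- inner loop: while p <= n: vals.add(p); p *= 3   (hp : 1 ≤ p only justifies termination)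
def A003586Alt.loop3 (n p : Int) (hp : 1 ≤ p) (vals : PySem.Set Int) : PySem.Set Int :=
  if h : p ≤ n then A003586Alt.loop3 n (p * 3) (by omega) (PySem.Set.add vals p) else vals
  termination_by (n + 1 - p).toNat
  decreasing_by omega

-- outer loop: while p2 <= n: <inner loop from p2>; p2 *= 2
def A003586Alt.loop2 (n p2 : Int) (hp : 1 ≤ p2) (vals : PySem.Set Int) : PySem.Set Int :=
  if h : p2 ≤ n then A003586Alt.loop2 n (p2 * 2) (by omega) (A003586Alt.loop3 n p2 hp vals)
  else vals
  termination_by (n + 1 - p2).toNat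
  decreasing_by omega

def A003586_alt (n : Int) : List Int :=
  PySem.List.sorted (A003586Alt.loop2 n 1 (by omega) (PySem.Set.ofList [1])) (fun x => x) true

-- ===== PRECONDITION & SPEC =====
def Spec_A003586 (n : Int) (out : List Int) : Prop := out = A003586_alt n
instance (n : Int) (out : List Int) : Decidable (Spec_A003586 n out) := by unfold Spec_A003586; infer_instance

-- ===== CLAIM (what is proved, stated in full; the proofs are below) =====
def Claim_equal_A003586 : Prop := ∀ (n : Int), Dom_A003586 n → Spec_A003586 n (A003586 n)

-- ===== LEMMAS AND PROOFS =====

-- the 3-smooth numbers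
def Sm (x : Int) : Prop := ∃ a b : Nat, x = 2 ^ a * 3 ^ b

lemma Sm_one : Sm 1 := ⟨0, 0, rfl⟩

lemma Sm_pos {x : Int} (h : Sm x) : 1 ≤ x := by
  obtain ⟨a, b, rfl⟩ := h
  have h2 : (1 : Int) ≤ 2 ^ a := one_le_pow₀ (by norm_num)
  have h3 : (1 : Int) ≤ 3 ^ b := one_le_pow₀ (by norm_num)
  nlinarith

lemma Sm_mul2 {x : Int} (h : Sm x) : Sm (x * 2) := by
  obtain ⟨a, b, rfl⟩ := h; exact ⟨a + 1, b, by ring⟩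

lemma Sm_mul3 {x : Int} (h : Sm x) : Sm (x * 3) := by
  obtain ⟨a, b, rfl⟩ := h; exact ⟨a, b + 1, by ring⟩

lemma Sm_decomp {x : Int} (h : Sm x) (hx : 2 ≤ x) :
    (∃ y, Sm y ∧ x = y * 2) ∨ (∃ y, Sm y ∧ x = y * 3) := by
  obtain ⟨a, b, rfl⟩ := h
  cases a with
  | succ a => exact Or.inl ⟨2 ^ a * 3 ^ b, ⟨a, b, rfl⟩, by ring⟩
  | zero =>
    cases b with
    | zero => norm_num at hx
    | succ b => exact Or.inr ⟨3 ^ b, ⟨0, b, by ring⟩, by ring⟩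

-- B-side characterisation -----------------------------------------------------

lemma mem_loop3 (n p : Int) (hp : 1 ≤ p) (vals : PySem.Set Int) (x : Int) :
    x ∈ A003586Alt.loop3 n p hp vals ↔ x ∈ vals ∨ ∃ b : Nat, x = p * 3 ^ b ∧ x ≤ n := by
  induction p, hp, vals using A003586Alt.loop3.induct (n := n) with
  | case1 p hp vals h ih =>
    rw [A003586Alt.loop3, dif_pos h, ih]
    constructor
    · rintro (hv | ⟨b, rfl, hb⟩)
      · rw [PySem.Set.mem_add] at hv
        rcases hv with hv | rfl
        · exact Or.inl hv
        · exact Or.inr ⟨0, by ring, h⟩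
      · exact Or.inr ⟨b + 1, by ring, hb⟩
    · rintro (hv | ⟨b, rfl, hb⟩)
      · exact Or.inl (by rw [PySem.Set.mem_add]; exact Or.inl hv)
      · cases b with
        | zero => exact Or.inl (by rw [PySem.Set.mem_add]; right; ring)
        | succ b => exact Or.inr ⟨b, by ring, hb⟩
  | case2 p hp vals h =>
    rw [A003586Alt.loop3, dif_neg h]
    constructor
    · exact Or.inl
    · rintro (hv | ⟨b, rfl, hb⟩)
      · exact hv
      · exfalso
        have h3 : (1 : Int) ≤ 3 ^ b := one_le_pow₀ (by norm_num)
        nlinarith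

lemma nodup_loop3 (n p : Int) (hp : 1 ≤ p) (vals : PySem.Set Int) (h : vals.Nodup) :
    (A003586Alt.loop3 n p hp vals).Nodup := by
  induction p, hp, vals using A003586Alt.loop3.induct (n := n) with
  | case1 p hp vals hle ih =>
    rw [A003586Alt.loop3, dif_pos hle]
    exact ih (PySem.Set.nodup_add _ _ h)
  | case2 p hp vals hle => rwa [A003586Alt.loop3, dif_neg hle]

lemma mem_loop2 (n p2 : Int) (hp : 1 ≤ p2) (vals : PySem.Set Int) (x : Int) :
    x ∈ A003586Alt.loop2 n p2 hp vals ↔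
      x ∈ vals ∨ ∃ a b : Nat, x = p2 * 2 ^ a * 3 ^ b ∧ x ≤ n := by
  induction p2, hp, vals using A003586Alt.loop2.induct (n := n) with
  | case1 p2 hp vals h ih =>
    rw [A003586Alt.loop2, dif_pos h, ih, mem_loop3]
    constructor
    · rintro ((hv | ⟨b, rfl, hb⟩) | ⟨a, b, rfl, hb⟩)
      · exact Or.inl hv
      · exact Or.inr ⟨0, b, by ring, hb⟩
      · exact Or.inr ⟨a + 1, b, by ring, hb⟩
    · rintro (hv | ⟨a, b, rfl, hb⟩)
      · exact Or.inl (Or.inl hv)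
      · cases a with
        | zero => exact Or.inl (Or.inr ⟨b, by ring, hb⟩)
        | succ a => exact Or.inr ⟨a, b, by ring, hb⟩
  | case2 p2 hp vals h =>
    rw [A003586Alt.loop2, dif_neg h]
    constructor
    · exact Or.inl
    · rintro (hv | ⟨a, b, rfl, hb⟩)
      · exact hv
      · exfalso
        have h2 : (1 : Int) ≤ 2 ^ a := one_le_pow₀ (by norm_num)
        have h3 : (1 : Int) ≤ 3 ^ b := one_le_pow₀ (by norm_num)
        have ha : p2 * 1 ≤ p2 * 2 ^ a := mul_le_mul_of_nonneg_left h2 (by omega)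
        have hb2 : p2 * 2 ^ a * 1 ≤ p2 * 2 ^ a * 3 ^ b :=
          mul_le_mul_of_nonneg_left h3 (by nlinarith)
        linarith

lemma nodup_loop2 (n p2 : Int) (hp : 1 ≤ p2) (vals : PySem.Set Int) (h : vals.Nodup) :
    (A003586Alt.loop2 n p2 hp vals).Nodup := by
  induction p2, hp, vals using A003586Alt.loop2.induct (n := n) with
  | case1 p2 hp vals hle ih =>
    rw [A003586Alt.loop2, dif_pos hle]
    exact ih (nodup_loop3 _ _ _ _ h)
  | case2 p2 hp vals hle => rwa [A003586Alt.loop2, dif_neg hle]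

lemma mem_valsB (n x : Int) :
    x ∈ A003586Alt.loop2 n 1 (by omega) (PySem.Set.ofList [1]) ↔
      Sm x ∧ 1 ≤ x ∧ x ≤ max n 1 := by
  rw [mem_loop2, PySem.Set.mem_ofList]
  constructor
  · rintro (hv | ⟨a, b, rfl, hb⟩)
    · simp at hv
      subst hv
      exact ⟨Sm_one, le_refl _, le_max_right _ _⟩
    · refine ⟨⟨a, b, by ring⟩, Sm_pos ⟨a, b, by ring⟩, le_trans hb (le_max_left _ _)⟩
  · rintro ⟨⟨a, b, rfl⟩, h1, h2⟩
    by_cases hn : 2 ^ a * 3 ^ b ≤ n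
    · exact Or.inr ⟨a, b, by ring, hn⟩
    · left
      simp only [List.mem_singleton]
      omega

-- A-side loop invariant proof -------------------------------------------------

lemma loopA_spec (n : Int) (fuel : Nat) :
    ∀ (seq : List Int) (i j : Nat) (k L : Int) (hne : seq ≠ [])
      (hlast : seq.getLast hne = L)
      (hpair : List.Pairwise (· < ·) seq)
      (hmem : ∀ x, x ∈ seq ↔ Sm x ∧ 1 ≤ x ∧ x ≤ L)
      (hL : L ≤ max n 1)
      (hi : i < seq.length) (hj : j < seq.length)
      (hI : ∀ idx (h : idx < seq.length), idx < i ↔ seq[idx] * 2 ≤ L)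
      (hJ : ∀ idx (h : idx < seq.length), idx < j ↔ seq[idx] * 3 ≤ L)
      (hfuel : (n - L).toNat < fuel),
      ∃ s : List Int, A003586.loop n seq i j k fuel = s.reverse ∧
        List.Pairwise (· < ·) s ∧ ∀ x, (x ∈ s ↔ Sm x ∧ 1 ≤ x ∧ x ≤ max n 1) := by
  induction fuel with
  | zero => intro seq i j k L hne hlast hpair hmem hL hi hj hI hJ hfuel; omega
  | succ fuel ih =>
    intro seq i j k L hne hlast hpair hmem hL hi hj hI hJ hfuel
    have hgi : seq.getD i 0 = seq[i] := List.getD_eq_getElem seq 0 hi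
    have hgj : seq.getD j 0 = seq[j] := List.getD_eq_getElem seq 0 hj
    have hL1 : 1 ≤ L := by
      have := ((hmem L).mp (hlast ▸ List.getLast_mem hne)).2.1
      exact this
    have hmono : ∀ a b (ha : a < seq.length) (hb : b < seq.length), a < b → seq[a] < seq[b] :=
      fun a b ha hb hab => List.pairwise_iff_getElem.mp hpair a b ha hb hab
    have hifacts := (hmem seq[i]).mp (List.getElem_mem hi)
    have hjfacts := (hmem seq[j]).mp (List.getElem_mem hj)
    have h2i : ¬ (seq[i] * 2 ≤ L) := fun hle => absurd ((hI i hi).mpr hle) (lt_irrefl i)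
    have h3j : ¬ (seq[j] * 3 ≤ L) := fun hle => absurd ((hJ j hj).mpr hle) (lt_irrefl j)
    set val := min (seq[i] * 2) (seq[j] * 3) with hvaldef
    have hvi : val ≤ seq[i] * 2 := min_le_left _ _
    have hvj : val ≤ seq[j] * 3 := min_le_right _ _
    have hvalL : L < val := lt_min (by omega) (by omega)
    have hSmval : Sm val := by
      rcases min_choice (seq[i] * 2) (seq[j] * 3) with hc | hc
      · rw [hvaldef, hc]; exact Sm_mul2 hifacts.1
      · rw [hvaldef, hc]; exact Sm_mul3 hjfacts.1
    -- minimality: val is the least 3-smooth number above L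
    have hmin : ∀ x, Sm x → L < x → val ≤ x := by
      intro x hsm hx
      have hx2 : 2 ≤ x := by omega
      rcases Sm_decomp hsm hx2 with ⟨y, hy, rfl⟩ | ⟨y, hy, rfl⟩
      · have hy1 := Sm_pos hy
        by_cases hyL : y ≤ L
        · obtain ⟨idx, hidx, rfl⟩ := List.mem_iff_getElem.mp ((hmem y).mpr ⟨hy, hy1, hyL⟩)
          have hni : ¬ idx < i := fun hlt => by have := (hI idx hidx).mp hlt; omega
          have : seq[i] ≤ seq[idx] := by
            rcases Nat.lt_or_ge i idx with hlt | hge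
            · exact le_of_lt (hmono i idx hi hidx hlt)
            · have : i = idx := by omega
              subst this; exact le_refl _
          omega
        · omega
      · have hy1 := Sm_pos hy
        by_cases hyL : y ≤ L
        · obtain ⟨idx, hidx, rfl⟩ := List.mem_iff_getElem.mp ((hmem y).mpr ⟨hy, hy1, hyL⟩)
          have hnj : ¬ idx < j := fun hlt => by have := (hJ idx hidx).mp hlt; omega
          have : seq[j] ≤ seq[idx] := by
            rcases Nat.lt_or_ge j idx with hlt | hge
            · exact le_of_lt (hmono j idx hj hidx hlt)
            · have : j = idx := by omega
              subst this; exact le_refl _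
          omega
        · omega
    rw [A003586.loop]
    simp only [hgi, hgj, ← hvaldef]
    by_cases hbr : val > n
    · rw [if_pos hbr, PySem.List.slice?_none_none_neg_one, Option.getD_some]
      refine ⟨seq, rfl, hpair, fun x => ?_⟩
      rw [hmem x]
      constructor
      · rintro ⟨hsm, h1, h2⟩
        exact ⟨hsm, h1, by omega⟩
      · rintro ⟨hsm, h1, h2⟩
        refine ⟨hsm, h1, ?_⟩
        by_contra hgt
        have := hmin x hsm (by omega)
        omega
    · rw [if_neg hbr]
      have hval_n : val ≤ n := by omega
      have hlen' : seq.length < (seq ++ [val]).length := by simp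
      have hgi' : (seq ++ [val]).getD i 0 = seq[i] := by
        rw [List.getD_eq_getElem _ 0 (by simp; omega), List.getElem_append_left hi]
      have hgj' : (seq ++ [val]).getD j 0 = seq[j] := by
        rw [List.getD_eq_getElem _ 0 (by simp; omega), List.getElem_append_left hj]
      simp only [hgi', hgj']
      have hne' : seq ++ [val] ≠ [] := by simp
      have hlast' : (seq ++ [val]).getLast hne' = val := List.getLast_concat
      have hget' : ∀ idx (h : idx < (seq ++ [val]).length),
          (seq ++ [val])[idx] = if h2 : idx < seq.length then seq[idx] else val := by
        intro idx h
        split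
        · exact List.getElem_append_left ‹_›
        · exact List.getElem_concat_length (by simp at h; omega) h
      have hpair' : List.Pairwise (· < ·) (seq ++ [val]) := by
        rw [List.pairwise_append]
        refine ⟨hpair, List.pairwise_singleton _ _, ?_⟩
        intro a ha b hb
        simp at hb
        subst hb
        have := ((hmem a).mp ha).2.2
        omega
      have hmem' : ∀ x, x ∈ seq ++ [val] ↔ Sm x ∧ 1 ≤ x ∧ x ≤ val := by
        intro x
        rw [List.mem_append, List.mem_singleton, hmem x]
        constructor
        · rintro (⟨hsm, h1, h2⟩ | rfl)
          · exact ⟨hsm, h1, by omega⟩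
          · exact ⟨hSmval, by omega, le_refl _⟩
        · rintro ⟨hsm, h1, h2⟩
          by_cases hxL : x ≤ L
          · exact Or.inl ⟨hsm, h1, hxL⟩
          · right
            have := hmin x hsm (by omega)
            omega
      refine ih (seq ++ [val]) _ _ (k + 1) val hne' hlast' hpair' hmem' (by omega)
        ?_ ?_ ?_ ?_ (by omega)
      · split <;> simp <;> omega
      · split <;> simp <;> omega
      · -- the i-pointer invariant
        intro idx h
        rw [hget' idx h]
        by_cases hc : val = seq[i] * 2
        · simp only [if_pos hc]
          split
          · rename_i hidx
            rcases Nat.lt_trichotomy idx i with hlt | rfl | hgt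
            · have := (hI idx hidx).mp hlt
              constructor <;> intro <;> omega
            · constructor <;> intro <;> omega
            · have : seq[i] < seq[idx] := hmono i idx hi hidx hgt
              constructor <;> intro <;> omega
          · rename_i hidx
            have hidx' : idx = seq.length := by simp at h; omega
            constructor <;> intro <;> omega
        · simp only [if_neg hc]
          have hvlt : val < seq[i] * 2 := lt_of_le_of_ne hvi hc
          split
          · rename_i hidx
            rcases Nat.lt_or_ge idx i with hlt | hge
            · have := (hI idx hidx).mp hlt
              constructor <;> intro <;> omega
            · have : seq[i] ≤ seq[idx] := by
                rcases Nat.lt_or_ge i idx with hlt2 | hge2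
                · exact le_of_lt (hmono i idx hi hidx hlt2)
                · have : i = idx := by omega
                  subst this; exact le_refl _
              constructor <;> intro <;> omega
          · rename_i hidx
            have hidx' : idx = seq.length := by simp at h; omega
            constructor <;> intro <;> omega
      · -- the j-pointer invariant (symmetric)
        intro idx h
        rw [hget' idx h]
        by_cases hc : val = seq[j] * 3
        · simp only [if_pos hc]
          split
          · rename_i hidx
            rcases Nat.lt_trichotomy idx j with hlt | rfl | hgt
            · have := (hJ idx hidx).mp hlt
              constructor <;> intro <;> omega
            · constructor <;> intro <;> omega
            · have : seq[j] < seq[idx] := hmono j idx hj hidx hgt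
              constructor <;> intro <;> omega
          · rename_i hidx
            have hidx' : idx = seq.length := by simp at h; omega
            constructor <;> intro <;> omega
        · simp only [if_neg hc]
          have hvlt : val < seq[j] * 3 := lt_of_le_of_ne hvj hc
          split
          · rename_i hidx
            rcases Nat.lt_or_ge idx j with hlt | hge
            · have := (hJ idx hidx).mp hlt
              constructor <;> intro <;> omega
            · have : seq[j] ≤ seq[idx] := by
                rcases Nat.lt_or_ge j idx with hlt2 | hge2
                · exact le_of_lt (hmono j idx hj hidx hlt2)
                · have : j = idx := by omega
                  subst this; exact le_refl _
              constructor <;> intro <;> omega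
          · rename_i hidx
            have hidx' : idx = seq.length := by simp at h; omega
            constructor <;> intro <;> omega

-- assembling the two sides ----------------------------------------------------

lemma sorted_rev_eq_sorted_neg (xs : List Int) :
    PySem.List.sorted xs (fun x => x) true = PySem.List.sorted xs (fun x => -x) false := by
  rw [PySem.List.sorted_rev_eq_foldl_insertBy, PySem.List.sorted_eq_foldl_insertBy]
  congr 1
  funext acc x
  congr 1
  funext a b
  simp

-- ===== VERDICT (by name: the statement is the Claim_ definition above) =====
theorem A003586_spec : Claim_equal_A003586 := by
  intro n _
  unfold Spec_A003586
  obtain ⟨s, hres, hpair, hmem⟩ :=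
    loopA_spec n (n.toNat + 1) [1] 0 0 0 1 (by simp) (by simp) (by simp)
      (by
        intro x
        simp only [List.mem_singleton]
        constructor
        · rintro rfl
          exact ⟨Sm_one, le_refl _, le_refl _⟩
        · rintro ⟨hsm, h1, h2⟩
          omega)
      (le_max_right _ _)
      (by simp) (by simp)
      (by
        intro idx h
        have : idx = 0 := by simp at h; omega
        subst this
        simp)
      (by
        intro idx h
        have : idx = 0 := by simp at h; omega
        subst this
        simp)
      (by omega)
  rw [A003586, hres, A003586_alt, sorted_rev_eq_sorted_neg]
  have hnod : s.reverse.Nodup := by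
    rw [List.nodup_reverse]
    exact hpair.nodup
  have hnodB : (A003586Alt.loop2 n 1 (by omega) (PySem.Set.ofList [1])).Nodup :=
    nodup_loop2 _ _ _ _ (PySem.Set.nodup_ofList _)
  refine (PySem.List.sorted_eq_of_perm_of_pairwise_lt _ _ _ ?_ ?_).symm
  · rw [List.perm_ext_iff_of_nodup hnod hnodB]
    intro x
    rw [List.mem_reverse, hmem x, mem_valsB]
  · rw [List.pairwise_reverse]
    simp only [neg_lt_neg_iff]
    exact hpair
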